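-- pv_equiv track=rewrite | github.com/warp-oss-org/civix | src/civix/domains/hazard_risk/adapters/sources/fr/georisques_pprn/adapter.py | _canonical_fieldnames
-- ===== SOURCE A (Python) =====
-- from collections.abc import AsyncIterable, Iterator, Mapping, Sequence
--
-- def _canonical_fieldnames(fieldnames: Sequence[str]) -> tuple[str, ...]:
--     seen: dict[str, int] = {}
--     canonical: list[str] = []
--
--     for field_name in fieldnames:
--         count = seen.get(field_name, 0) + 1
--         seen[field_name] = count
--
--         if field_name == "CODE RISQUE 2" and count == 2:
--             canonical.append("CODE RISQUE 3")
--             continue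
--
--         canonical.append(field_name)
--
--     return tuple(canonical)
-- ===== SOURCE B (Python) =====
-- def _canonical_fieldnames(fieldnames):
--     indices = [i for i, name in enumerate(fieldnames) if name == "CODE RISQUE 2"]
--     result = list(fieldnames)
--     if len(indices) >= 2:
--         result[indices[1]] = "CODE RISQUE 3"
--     return tuple(result)
-- ===== Notes on version B (the rewrite author's own statement) =====
-- stated objective: simpler
-- what changed: Replaces the running per-name seen-counter dict and branch-in-loop accumulation with an up-front computation of the occurrence indices of "CODE RISQUE 2" followed by a single positional overwrite of the second one.
import Mathlib
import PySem

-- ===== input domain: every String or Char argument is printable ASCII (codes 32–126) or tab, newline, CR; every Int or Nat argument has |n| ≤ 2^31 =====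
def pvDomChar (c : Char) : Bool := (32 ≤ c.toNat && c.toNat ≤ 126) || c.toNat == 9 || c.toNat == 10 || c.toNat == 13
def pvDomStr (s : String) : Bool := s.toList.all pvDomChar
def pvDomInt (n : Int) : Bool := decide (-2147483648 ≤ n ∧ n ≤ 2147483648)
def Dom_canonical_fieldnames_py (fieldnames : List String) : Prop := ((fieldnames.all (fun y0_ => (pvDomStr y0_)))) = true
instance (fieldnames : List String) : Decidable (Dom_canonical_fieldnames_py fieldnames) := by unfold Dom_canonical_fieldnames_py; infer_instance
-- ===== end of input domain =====

-- B computes the occurrence indices of "CODE RISQUE 2" up front and overwrites the second one,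
-- instead of A's running seen-counter dict with a branch inside the loop (objective: simpler).

-- ===== PORT A =====
-- one loop iteration of A: update the seen counter, append (possibly renamed) field
def pvStepA (st : PySem.Dict String Int × List String) (field_name : String) :
    PySem.Dict String Int × List String :=
  let count := st.1.getD field_name 0 + 1
  let seen := st.1.insert field_name count
  if field_name = "CODE RISQUE 2" ∧ count = 2 then (seen, st.2 ++ ["CODE RISQUE 3"])
  else (seen, st.2 ++ [field_name])

def canonical_fieldnames_py (fieldnames : List String) : List String :=
  (fieldnames.foldl pvStepA (PySem.Dict.empty, [])).2

-- ===== PORT B =====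
def canonical_fieldnames_py_alt (fieldnames : List String) : List String :=
  let indices : List Int :=
    (PySem.List.enumerate fieldnames 0).filterMap
      (fun p => if p.2 = "CODE RISQUE 2" then some p.1 else none)
  if 2 ≤ indices.length then
    -- result[indices[1]] = "CODE RISQUE 3": the guard makes index 1 in range, so getD is exact
    fieldnames.set (indices.getD 1 0).toNat "CODE RISQUE 3"
  else fieldnames

-- ===== PRECONDITION & SPEC =====
def Spec_canonical_fieldnames_py (fieldnames : List String) (out : List String) : Prop := out = canonical_fieldnames_py_alt fieldnames
instance (fieldnames : List String) (out : List String) : Decidable (Spec_canonical_fieldnames_py fieldnames out) := by unfold Spec_canonical_fieldnames_py; infer_instance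

-- ===== CLAIM (what is proved, stated in full; the proofs are below) =====
def Claim_equal_canonical_fieldnames_py : Prop := ∀ (fieldnames : List String), Dom_canonical_fieldnames_py fieldnames → Spec_canonical_fieldnames_py fieldnames (canonical_fieldnames_py fieldnames)

-- ===== LEMMAS AND PROOFS =====

-- reference: mark the occurrence of "CODE RISQUE 2" that brings the running count c to 2
def pvMark (c : Int) : List String → List String
  | [] => []
  | x :: xs =>
    if x = "CODE RISQUE 2" then
      (if c + 1 = 2 then "CODE RISQUE 3" else x) :: pvMark (c + 1) xs
    else x :: pvMark c xs

-- reference: 0-based positions of "CODE RISQUE 2"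
def pvIdx : List String → List Nat
  | [] => []
  | x :: xs => if x = "CODE RISQUE 2" then 0 :: (pvIdx xs).map (· + 1) else (pvIdx xs).map (· + 1)

lemma pvMarkA (xs : List String) : ∀ (seen : PySem.Dict String Int) (acc : List String),
    (List.foldl pvStepA (seen, acc) xs).2 = acc ++ pvMark (seen.getD "CODE RISQUE 2" 0) xs := by
  induction xs with
  | nil => intro seen acc; simp [pvMark]
  | cons x xs ih =>
    intro seen acc
    by_cases hx : x = "CODE RISQUE 2"
    · subst hx
      by_cases hc : seen.getD "CODE RISQUE 2" 0 + 1 = 2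
      · simp [pvStepA, hc, pvMark, ih, PySem.Dict.getD_insert_self]
      · simp [pvStepA, hc, pvMark, ih, PySem.Dict.getD_insert_self]
    · have hne : "CODE RISQUE 2" ≠ x := fun h => hx h.symm
      simp [pvStepA, hx, pvMark, ih, PySem.Dict.getD_insert, hne]

lemma pvIdxE (xs : List String) : ∀ (s : Int),
    (PySem.List.enumerate xs s).filterMap
        (fun p => if p.2 = "CODE RISQUE 2" then some p.1 else none)
      = (pvIdx xs).map (fun n => s + Int.ofNat n) := by
  induction xs with
  | nil => intro s; simp [pvIdx, PySem.List.enumerate_nil]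
  | cons x xs ih =>
    intro s
    have htail : ((pvIdx xs).map (· + 1)).map (fun n => s + Int.ofNat n)
        = (pvIdx xs).map (fun n => (s + 1) + Int.ofNat n) := by
      rw [List.map_map]
      apply List.map_congr_left
      intro a _
      show s + Int.ofNat (a + 1) = s + 1 + Int.ofNat a
      push_cast [Int.ofNat_eq_natCast]
      ring
    by_cases hx : x = "CODE RISQUE 2" <;>
      simp only [pvIdx, PySem.List.enumerate_cons, List.filterMap_cons, hx, if_pos,
        reduceIte, List.map_cons, ih (s + 1), ← htail] <;> simp

lemma pvMark_ge_two (xs : List String) : ∀ (c : Int), 2 ≤ c → pvMark c xs = xs := by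
  induction xs with
  | nil => intro c _; rfl
  | cons x xs ih =>
    intro c hc
    by_cases hx : x = "CODE RISQUE 2"
    · have : ¬ (c + 1 = 2) := by omega
      simp [pvMark, hx, this, ih (c + 1) (by omega)]
    · simp [pvMark, hx, ih c hc]

lemma pvMark_one (xs : List String) :
    pvMark 1 xs = (match pvIdx xs with
                   | j :: _ => xs.set j "CODE RISQUE 3"
                   | [] => xs) := by
  induction xs with
  | nil => rfl
  | cons x xs ih =>
    by_cases hx : x = "CODE RISQUE 2"
    · subst hx
      simp [pvMark, pvIdx, pvMark_ge_two xs 2 (by omega)]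
    · cases h : pvIdx xs with
      | nil => simp [pvMark, pvIdx, hx, ih, h]
      | cons j t => simp [pvMark, pvIdx, hx, ih, h]

lemma pvMark_zero (xs : List String) :
    pvMark 0 xs = (match pvIdx xs with
                   | _ :: j :: _ => xs.set j "CODE RISQUE 3"
                   | _ => xs) := by
  induction xs with
  | nil => rfl
  | cons x xs ih =>
    by_cases hx : x = "CODE RISQUE 2"
    · subst hx
      cases h : pvIdx xs with
      | nil => simp [pvMark, pvIdx, pvMark_one, h]
      | cons j t => simp [pvMark, pvIdx, pvMark_one, h]
    · cases h : pvIdx xs with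
      | nil => simp [pvMark, pvIdx, hx, ih, h]
      | cons j t =>
        cases t with
        | nil => simp [pvMark, pvIdx, hx, ih, h]
        | cons k t' => simp [pvMark, pvIdx, hx, ih, h]

lemma pvAltChar (xs : List String) :
    canonical_fieldnames_py_alt xs = (match pvIdx xs with
                                      | _ :: j :: _ => xs.set j "CODE RISQUE 3"
                                      | _ => xs) := by
  unfold canonical_fieldnames_py_alt
  rw [pvIdxE xs 0]
  cases h : pvIdx xs with
  | nil => simp
  | cons j t =>
    cases t with
    | nil => simp
    | cons k t' => simp

-- ===== VERDICT (by name: the statement is the Claim_ definition above) =====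
theorem canonical_fieldnames_py_spec : Claim_equal_canonical_fieldnames_py := by
  intro fieldnames _
  unfold Spec_canonical_fieldnames_py canonical_fieldnames_py
  rw [pvMarkA fieldnames PySem.Dict.empty [], pvAltChar fieldnames]
  simp [PySem.Dict.getD_empty, pvMark_zero]
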